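-- pv_equiv track=rewrite | github.com/emendezguzman/rationalisation_framework | data_preprocessing.py | generate_rationales_attention
-- ===== SOURCE A (Python) =====
-- def generate_rationales_attention(offsets_mapping, consolidated_human_rationales):
--
--   #Auxiliary list
--   rationales_attentions = list()
--
--   #Going through every example
--   for i in range(len(offsets_mapping)):
--
--     #Auxiliary list
--     rationales_attentions_item = list()
--
--     #Going through every label
--     for label in consolidated_human_rationales[i].keys():
--
--       attention_mask_label = [0] * len(offsets_mapping[i])
--
--       for j, (start, end) in enumerate(offsets_mapping[i]):
--
--         #Checking rationales per label
--         if len(consolidated_human_rationales[i][label]) > 0: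
--
--           for k in range(len(consolidated_human_rationales[i][label])):
--
--             rationale_start = consolidated_human_rationales[i][label][k][0]
--             rationale_end = consolidated_human_rationales[i][label][k][1]
--
--             if (start >= rationale_start and end <= rationale_end):
--
--               attention_mask_label[j] = 1
--
--       #Storing rationale mask per label
--       rationales_attentions_item.append(attention_mask_label)
--
--     #Storing rationale mask per item
--     rationales_attentions.append(rationales_attentions_item)
--
--   return rationales_attentions
-- ===== SOURCE B (Python) =====
-- def _prefix_max(ss):
--     # running maximum of the span ends, position k = max end among ss[0..k]
--     pm = []
--     cur = None
--     for _, re_ in ss: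
--         cur = re_ if cur is None else max(cur, re_)
--         pm.append(cur)
--     return pm
--
--
-- def _bisect_right(a, x):
--     # bisect.bisect_right(a, x) (the bisect module cannot be imported here:
--     # the original module imports nothing), standard lo/hi halving loop
--     lo, hi = 0, len(a)
--     while lo < hi:
--         mid = (lo + hi) // 2
--         if x < a[mid]:
--             hi = mid
--         else:
--             lo = mid + 1
--     return lo
--
--
-- def generate_rationales_attention(offsets_mapping, consolidated_human_rationales):
--     # Per label: sort the rationale spans by start, precompute the prefix maxima of
--     # their ends, then answer each token (s, e) with one binary search: some span
--     # contains the token iff among the spans whose start is <= s (a sorted prefix,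
--     # found by bisect) the maximal end is >= e.
--     result = []
--     for i in range(len(offsets_mapping)):
--         toks = offsets_mapping[i]
--         item = []
--         for spans in consolidated_human_rationales[i].values():
--             ss = sorted(spans, key=lambda sp: sp[0])
--             starts = [sp[0] for sp in ss]
--             pm = _prefix_max(ss)
--             mask = []
--             for s, e in toks:
--                 r = _bisect_right(starts, s)
--                 mask.append(1 if r > 0 and e <= pm[r - 1] else 0)
--             item.append(mask)
--         result.append(item)
--     return result
-- ===== Notes on version B (the rewrite author's own statement) =====
-- stated objective: alternative
-- what changed: Per label, B sorts the rationale spans by start and precomputes prefix maxima of their ends, then answers each token with one binary search (some span contains the token iff the max end among spans starting at or before the token start is >= the token end), replacing A's per-token linear scan over all spans.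
import Mathlib
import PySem

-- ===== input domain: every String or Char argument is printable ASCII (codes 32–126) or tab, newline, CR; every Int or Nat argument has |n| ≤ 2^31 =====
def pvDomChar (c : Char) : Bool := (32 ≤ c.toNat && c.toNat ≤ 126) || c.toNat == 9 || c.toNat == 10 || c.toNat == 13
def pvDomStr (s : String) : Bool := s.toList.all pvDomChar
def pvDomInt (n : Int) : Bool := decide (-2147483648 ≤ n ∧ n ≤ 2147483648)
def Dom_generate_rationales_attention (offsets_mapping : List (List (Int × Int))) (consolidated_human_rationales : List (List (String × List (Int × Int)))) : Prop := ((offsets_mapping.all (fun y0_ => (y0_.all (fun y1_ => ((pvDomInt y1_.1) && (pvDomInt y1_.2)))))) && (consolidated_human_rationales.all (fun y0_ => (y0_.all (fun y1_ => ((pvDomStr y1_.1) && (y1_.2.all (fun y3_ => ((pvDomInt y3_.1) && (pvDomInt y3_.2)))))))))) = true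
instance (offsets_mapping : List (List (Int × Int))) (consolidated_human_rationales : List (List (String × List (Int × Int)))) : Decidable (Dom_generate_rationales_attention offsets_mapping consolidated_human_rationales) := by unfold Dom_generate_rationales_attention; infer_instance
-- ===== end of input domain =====

-- ===== PORT A =====
-- B replaces A's per-token linear scan over all rationale spans by a different algorithm:
-- sort the spans + prefix maxima of their ends + one binary search per token (objective: alternative).
-- Python passes each element of consolidated_human_rationales as a dict; Dict.ofList models that
-- (last value wins on duplicate keys, first-occurrence key order) in both ports.
-- A's `consolidated[i][label]` is ported as Dict.getD with default []: label always comes from d.keys, so the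
-- lookup never misses and getD is exact; pyGetD ... [] is exact because Pre_ puts every index i in range.
def generate_rationales_attention (offsets_mapping : List (List (Int × Int))) (consolidated_human_rationales : List (List (String × List (Int × Int)))) : List (List (List Int)) :=
  (PySem.List.pyRange 0 (PySem.List.len offsets_mapping)).foldl (fun rationales_attentions i =>
    let toks := PySem.List.pyGetD offsets_mapping i []
    let d : PySem.Dict String (List (Int × Int)) :=
      PySem.Dict.ofList (PySem.List.pyGetD consolidated_human_rationales i [])
    let rationales_attentions_item := d.keys.foldl (fun item label =>
      let spans := d.getD label []
      let attention_mask_label := (PySem.List.enumerate toks).foldl (fun m je =>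
        if PySem.List.len spans > 0 then
          (PySem.List.pyRange 0 (PySem.List.len spans)).foldl (fun m k =>
            let sp := PySem.List.pyGetD spans k (0, 0)
            if je.2.1 ≥ sp.1 ∧ je.2.2 ≤ sp.2 then PySem.List.pySetD m je.1 1 else m) m
        else m) (List.replicate toks.length (0 : Int))
      item ++ [attention_mask_label]) []
    rationales_attentions ++ [rationales_attentions_item]) []

-- ===== PORT B =====
-- Source B's _prefix_max loop: recursion over the sorted spans carrying the running maximum `cur`
def pvPrefixMax : List (Int × Int) → Option Int → List Int
  | [], _ => []
  | sp :: rest, cur =>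
      let c := match cur with | none => sp.2 | some v => max v sp.2
      c :: pvPrefixMax rest (some c)

-- Source B's hand-written _bisect_right is exactly bisect.bisect_right's lo/hi halving loop
-- (the module is unimportable there), so it is ported as PySem.List.bisectRight, the same loop.
-- pm[r - 1] is ported as getD (r-1) 0: it is only read under r > 0 with r ≤ len pm, so it is exact;
-- pyGetD ... [] on the two outer lists is exact because Pre_ puts every index i in range.
def generate_rationales_attention_alt (offsets_mapping : List (List (Int × Int))) (consolidated_human_rationales : List (List (String × List (Int × Int)))) : List (List (List Int)) :=
  (PySem.List.pyRange 0 (PySem.List.len offsets_mapping)).foldl (fun result i =>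
    let toks := PySem.List.pyGetD offsets_mapping i []
    let d : PySem.Dict String (List (Int × Int)) :=
      PySem.Dict.ofList (PySem.List.pyGetD consolidated_human_rationales i [])
    let item := d.values.foldl (fun item spans =>
      let ss := PySem.List.sorted spans (fun sp => sp.1) false
      let starts := ss.map (fun sp => sp.1)
      let pm := pvPrefixMax ss none
      let mask := toks.foldl (fun mask t =>
        let r := PySem.List.bisectRight starts t.1
        mask ++ [if 0 < r ∧ t.2 ≤ pm.getD (r - 1) 0 then (1 : Int) else 0]) []
      item ++ [mask]) []
    result ++ [item]) []

-- ===== PRECONDITION & SPEC =====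
-- A indexes consolidated_human_rationales[i] for every i < len(offsets_mapping) and raises IndexError
-- when the rationales list is shorter (as does B); Pre_ excludes exactly those inputs.
def Pre_generate_rationales_attention (offsets_mapping : List (List (Int × Int))) (consolidated_human_rationales : List (List (String × List (Int × Int)))) : Prop :=
  offsets_mapping.length ≤ consolidated_human_rationales.length
instance (offsets_mapping : List (List (Int × Int))) (consolidated_human_rationales : List (List (String × List (Int × Int)))) : Decidable (Pre_generate_rationales_attention offsets_mapping consolidated_human_rationales) := by unfold Pre_generate_rationales_attention; infer_instance
def pvWitness_generate_rationales_attention : (List (List (Int × Int))) × (List (List (String × List (Int × Int)))) :=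
  ([[(0, 2), (3, 7)]], [[("a", [(0, 5)]), ("b", [])]])

def Spec_generate_rationales_attention (offsets_mapping : List (List (Int × Int))) (consolidated_human_rationales : List (List (String × List (Int × Int)))) (out : List (List (List Int))) : Prop := out = generate_rationales_attention_alt offsets_mapping consolidated_human_rationales
instance (offsets_mapping : List (List (Int × Int))) (consolidated_human_rationales : List (List (String × List (Int × Int)))) (out : List (List (List Int))) : Decidable (Spec_generate_rationales_attention offsets_mapping consolidated_human_rationales out) := by unfold Spec_generate_rationales_attention; infer_instance

-- ===== CLAIM (what is proved, stated in full; the proofs are below) =====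
def Claim_equal_generate_rationales_attention : Prop := ∀ (offsets_mapping : List (List (Int × Int))) (consolidated_human_rationales : List (List (String × List (Int × Int)))), Dom_generate_rationales_attention offsets_mapping consolidated_human_rationales → Pre_generate_rationales_attention offsets_mapping consolidated_human_rationales → Spec_generate_rationales_attention offsets_mapping consolidated_human_rationales (generate_rationales_attention offsets_mapping consolidated_human_rationales)

-- ===== LEMMAS AND PROOFS =====

-- the common mask characterisation: token j is 1 iff some span contains it
def pvMaskOf (toks spans : List (Int × Int)) : List Int :=
  toks.map (fun t => if spans.any (fun sp => decide (t.1 ≥ sp.1 ∧ t.2 ≤ sp.2)) then 1 else 0)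

-- marking fold over an enumeration: sets exactly the positions whose token satisfies P
lemma pv_enum_mark (P : (Int × Int) → Prop) [DecidablePred P] :
    ∀ (toks : List (Int × Int)) (pre rest : List Int), rest.length = toks.length →
    List.foldl (fun m (je : Int × (Int × Int)) => if P je.2 then PySem.List.pySetD m je.1 1 else m)
      (pre ++ rest) (PySem.List.enumerate toks (pre.length : Int))
    = pre ++ (toks.zip rest).map (fun p => if P p.1 then (1 : Int) else p.2) := by
  intro toks
  induction toks with
  | nil => intro pre rest h; simp at h; simp [h, PySem.List.enumerate_nil]
  | cons t toks ih =>
    intro pre rest h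
    cases rest with
    | nil => simp at h
    | cons r rest' =>
      simp only [List.length_cons, Nat.succ_inj] at h
      rw [PySem.List.enumerate_cons, List.foldl_cons]
      have hstep : (if P t then PySem.List.pySetD (pre ++ r :: rest') (pre.length : Int) 1
                    else pre ++ r :: rest')
          = (pre ++ [if P t then (1 : Int) else r]) ++ rest' := by
        by_cases hp : P t
        · simp [hp, PySem.List.pySetD_natCast]
        · simp [hp]
      rw [hstep]
      have hlen : ((pre ++ [if P t then (1 : Int) else r]).length : Int) = (pre.length : Int) + 1 := by
        simp
      rw [← hlen, ih _ rest' h]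
      simp [List.zip_cons_cons]

-- repeated marking at one fixed index collapses to a single conditional set
lemma pv_mark_spans (t : Int × Int) (n : Nat) :
    ∀ (spans : List (Int × Int)) (m : List Int),
    spans.foldl (fun m sp => if t.1 ≥ sp.1 ∧ t.2 ≤ sp.2 then PySem.List.pySetD m ((n : Nat) : Int) 1 else m) m
    = if spans.any (fun sp => decide (t.1 ≥ sp.1 ∧ t.2 ≤ sp.2)) then PySem.List.pySetD m ((n : Nat) : Int) 1 else m := by
  intro spans
  induction spans with
  | nil => intro m; simp
  | cons sp spans ih =>
    intro m
    rw [List.foldl_cons, List.any_cons]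
    by_cases hp : t.1 ≥ sp.1 ∧ t.2 ≤ sp.2
    · rw [if_pos hp, ih, decide_eq_true hp]
      simp [PySem.List.pySetD_natCast, List.set_set]
    · rw [if_neg hp, ih, decide_eq_false hp, Bool.false_or]

-- every index produced by enumerate from a Nat start is a Nat cast
lemma pv_enumerate_idx_nat : ∀ (toks : List (Int × Int)) (s : Nat) (p : Int × (Int × Int)),
    p ∈ PySem.List.enumerate toks (s : Int) → ∃ k : Nat, p.1 = (k : Int) := by
  intro toks
  induction toks with
  | nil => intro s p hp; simp [PySem.List.enumerate_nil] at hp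
  | cons t toks ih =>
    intro s p hp
    rw [PySem.List.enumerate_cons] at hp
    rcases List.mem_cons.mp hp with h | h
    · exact ⟨s, by simp [h]⟩
    · have : ((s : Int) + 1) = ((s + 1 : Nat) : Int) := by push_cast; ring
      rw [this] at h
      exact ih (s + 1) p h

lemma pv_zip_replicate_mask (spans : List (Int × Int)) : ∀ (toks : List (Int × Int)),
    (toks.zip (List.replicate toks.length (0 : Int))).map
      (fun p => if spans.any (fun sp => decide (p.1.1 ≥ sp.1 ∧ p.1.2 ≤ sp.2)) then (1 : Int) else p.2)
    = pvMaskOf toks spans := by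
  intro toks
  unfold pvMaskOf
  induction toks with
  | nil => simp
  | cons t toks ih =>
    simp only [List.length_cons, List.replicate_succ, List.zip_cons_cons, List.map_cons, ih]

-- A's per-label mask equals the characterisation
lemma pv_A_mask (toks spans : List (Int × Int)) :
    (PySem.List.enumerate toks).foldl (fun m je =>
        if PySem.List.len spans > 0 then
          (PySem.List.pyRange 0 (PySem.List.len spans)).foldl (fun m k =>
            let sp := PySem.List.pyGetD spans k (0, 0)
            if je.2.1 ≥ sp.1 ∧ je.2.2 ≤ sp.2 then PySem.List.pySetD m je.1 1 else m) m
        else m) (List.replicate toks.length (0 : Int))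
    = pvMaskOf toks spans := by
  have hcongr : ∀ (m : List Int) (je : Int × (Int × Int)), je ∈ PySem.List.enumerate toks ((0 : Nat) : Int) →
      (if PySem.List.len spans > 0 then
          (PySem.List.pyRange 0 (PySem.List.len spans)).foldl (fun m k =>
            let sp := PySem.List.pyGetD spans k (0, 0)
            if je.2.1 ≥ sp.1 ∧ je.2.2 ≤ sp.2 then PySem.List.pySetD m je.1 1 else m) m
        else m)
      = (if spans.any (fun sp => decide (je.2.1 ≥ sp.1 ∧ je.2.2 ≤ sp.2)) then PySem.List.pySetD m je.1 1 else m) := by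
    intro m je hje
    obtain ⟨k, hk⟩ := pv_enumerate_idx_nat toks 0 je hje
    rw [PySem.List.foldl_pyRange_pyGetD spans (0, 0)
      (fun m sp => if je.2.1 ≥ sp.1 ∧ je.2.2 ≤ sp.2 then PySem.List.pySetD m je.1 1 else m) m le_rfl]
    simp only [show Int.toNat 0 = 0 from rfl, List.drop_zero]
    rw [hk, pv_mark_spans]
    cases spans with
    | nil => simp
    | cons sp spans => simp [PySem.List.len]
  have h0 : ((0 : Nat) : Int) = (0 : Int) := by norm_num
  calc (PySem.List.enumerate toks).foldl _ (List.replicate toks.length (0 : Int))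
      = (PySem.List.enumerate toks ((0 : Nat) : Int)).foldl
          (fun m (je : Int × (Int × Int)) =>
            if spans.any (fun sp => decide (je.2.1 ≥ sp.1 ∧ je.2.2 ≤ sp.2)) = true
            then PySem.List.pySetD m je.1 1 else m)
          (List.replicate toks.length (0 : Int)) := by
        rw [h0]
        exact PySem.List.foldl_congr_mem _ _ _ _ (fun m je hje => by rw [← h0] at hje; exact hcongr m je hje)
    _ = pvMaskOf toks spans := by
        have := pv_enum_mark (fun t => spans.any (fun sp => decide (t.1 ≥ sp.1 ∧ t.2 ≤ sp.2)) = true)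
          toks [] (List.replicate toks.length (0 : Int)) (by simp)
        simp only [List.nil_append, List.length_nil] at this
        rw [this]
        exact pv_zip_replicate_mask spans toks

-- prefix maxima: entry r dominates e iff some of the first r+1 spans ends at e or later
-- (or the carried running maximum already does)
lemma pv_pm_iff : ∀ (ss : List (Int × Int)) (c : Option Int) (r : Nat) (e : Int), r < ss.length →
    (e ≤ (pvPrefixMax ss c).getD r 0 ↔
      (∃ sp ∈ ss.take (r + 1), e ≤ sp.2) ∨ ∃ v, c = some v ∧ e ≤ v) := by
  intro ss
  induction ss with
  | nil => intro c r e h; simp at h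
  | cons sp rest ih =>
    intro c r e h
    cases r with
    | zero =>
      cases c with
      | none => simp [pvPrefixMax]
      | some v => simp [pvPrefixMax, or_comm]
    | succ r =>
      have hr : r < rest.length := by simpa using h
      have := ih (some (match c with | none => sp.2 | some v => max v sp.2)) r e hr
      simp only [pvPrefixMax, List.getD_cons_succ] at *
      rw [this]
      cases c with
      | none =>
        simp only [List.take_succ_cons, List.mem_cons]
        constructor
        · rintro (⟨x, hx, hex⟩ | ⟨v, hv, hev⟩)
          · exact Or.inl ⟨x, Or.inr hx, hex⟩
          · exact Or.inl ⟨sp, Or.inl rfl, by cases hv; exact hev⟩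
        · rintro (⟨x, (rfl | hx), hex⟩ | ⟨v, hv, _⟩)
          · exact Or.inr ⟨x.2, rfl, hex⟩
          · exact Or.inl ⟨x, hx, hex⟩
          · cases hv
      | some v =>
        simp only [List.take_succ_cons, List.mem_cons, Option.some.injEq]
        constructor
        · rintro (⟨x, hx, hex⟩ | ⟨w, hw, hew⟩)
          · exact Or.inl ⟨x, Or.inr hx, hex⟩
          · rw [← hw] at hew
            rcases le_max_iff.mp hew with h1 | h2
            · exact Or.inr ⟨v, rfl, h1⟩
            · exact Or.inl ⟨sp, Or.inl rfl, h2⟩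
        · rintro (⟨x, (rfl | hx), hex⟩ | ⟨w, hw, hew⟩)
          · exact Or.inr ⟨max v x.2, rfl, le_max_of_le_right hex⟩
          · exact Or.inl ⟨x, hx, hex⟩
          · rw [← hw] at hew
            exact Or.inr ⟨max v sp.2, rfl, le_max_of_le_left hew⟩

-- B's per-token test (binary search into the sorted spans + prefix maxima) is span containment
lemma pv_B_token (spans : List (Int × Int)) (t : Int × Int) :
    (if 0 < PySem.List.bisectRight ((PySem.List.sorted spans (fun sp => sp.1) false).map (fun sp => sp.1)) t.1 ∧
        t.2 ≤ (pvPrefixMax (PySem.List.sorted spans (fun sp => sp.1) false) none).getD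
          (PySem.List.bisectRight ((PySem.List.sorted spans (fun sp => sp.1) false).map (fun sp => sp.1)) t.1 - 1) 0
      then (1 : Int) else 0)
    = if spans.any (fun sp => decide (t.1 ≥ sp.1 ∧ t.2 ≤ sp.2)) then 1 else 0 := by
  set ss := PySem.List.sorted spans (fun sp => sp.1) false with hss
  set starts := ss.map (fun sp => sp.1) with hstarts
  set r := PySem.List.bisectRight starts t.1 with hr
  have hpw : starts.Pairwise (· ≤ ·) := PySem.List.sorted_map_key_pairwise spans (fun sp => sp.1)
  obtain ⟨hrle, hlt, hgt⟩ := PySem.List.bisectRight_spec starts t.1 hpw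
  have hlen : starts.length = ss.length := by simp [hstarts]
  congr 1
  rw [eq_iff_iff]
  constructor
  · rintro ⟨hpos, hpm⟩
    have hidx : r - 1 < ss.length := by omega
    rw [pv_pm_iff ss none (r - 1) t.2 hidx] at hpm
    rcases hpm with ⟨sp, hsp, hesp⟩ | ⟨v, hv, _⟩
    · have hr1 : r - 1 + 1 = r := by omega
      rw [hr1] at hsp
      obtain ⟨k, hk, hkk⟩ := List.mem_take_iff_getElem.mp hsp
      have hk' : k < ss.length := lt_of_lt_of_le (lt_min_iff.mp hk).2 (by omega)
      have hks : starts[k]'(by omega) = (ss[k]'hk').1 := by simp [hstarts]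
      have hle : (ss[k]'hk').1 ≤ t.1 := by
        rw [← hks]; exact hlt k (by omega) (lt_min_iff.mp hk).1
      rw [List.any_eq_true]
      rw [hkk] at hle
      refine ⟨sp, ?_, decide_eq_true ⟨hle, hesp⟩⟩
      rw [← hkk]
      exact (PySem.List.mem_sorted _ _ _ _).mp (List.getElem_mem hk')
    · cases hv
  · intro hany
    obtain ⟨sp, hsp, hcond⟩ := List.any_eq_true.mp hany
    obtain ⟨h1, h2⟩ := of_decide_eq_true hcond
    have hsp' : sp ∈ ss := (PySem.List.mem_sorted _ _ _ _).mpr hsp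
    obtain ⟨k, hk, hkk⟩ := List.mem_iff_getElem.mp hsp'
    have hklt : k < r := by
      by_contra hge
      have := hgt k (by omega) (by omega)
      rw [List.getElem_map] at this
      rw [hkk] at this
      omega
    have hpos : 0 < r := by omega
    refine ⟨hpos, ?_⟩
    rw [pv_pm_iff ss none (r - 1) t.2 (by omega)]
    refine Or.inl ⟨sp, ?_, h2⟩
    have hr1 : r - 1 + 1 = r := by omega
    rw [hr1]
    exact List.mem_take_iff_getElem.mpr ⟨k, by omega, hkk⟩

-- B's per-label mask equals the characterisation
lemma pv_B_mask (toks spans : List (Int × Int)) :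
    toks.foldl (fun mask t =>
      mask ++ [if 0 < PySem.List.bisectRight ((PySem.List.sorted spans (fun sp => sp.1) false).map (fun sp => sp.1)) t.1 ∧
          t.2 ≤ (pvPrefixMax (PySem.List.sorted spans (fun sp => sp.1) false) none).getD
            (PySem.List.bisectRight ((PySem.List.sorted spans (fun sp => sp.1) false).map (fun sp => sp.1)) t.1 - 1) 0
        then (1 : Int) else 0]) []
    = pvMaskOf toks spans := by
  rw [PySem.List.foldl_append_singleton_eq_map]
  simp only [List.nil_append]
  unfold pvMaskOf
  exact List.map_congr_left (fun t _ => pv_B_token spans t)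

-- per-example: A's keys/lookups pass equals B's values pass
lemma pv_item_eq (toks : List (Int × Int)) (raw : List (String × List (Int × Int))) :
    (PySem.Dict.ofList (κ := String) raw).keys.foldl (fun item label =>
      item ++ [(PySem.List.enumerate toks).foldl (fun m je =>
        if PySem.List.len ((PySem.Dict.ofList raw).getD label []) > 0 then
          (PySem.List.pyRange 0 (PySem.List.len ((PySem.Dict.ofList raw).getD label []))).foldl (fun m k =>
            let sp := PySem.List.pyGetD ((PySem.Dict.ofList raw).getD label []) k (0, 0)
            if je.2.1 ≥ sp.1 ∧ je.2.2 ≤ sp.2 then PySem.List.pySetD m je.1 1 else m) m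
        else m) (List.replicate toks.length (0 : Int))]) []
    = (PySem.Dict.ofList (κ := String) raw).values.foldl (fun item spans =>
      item ++ [toks.foldl (fun mask t =>
        mask ++ [if 0 < PySem.List.bisectRight ((PySem.List.sorted spans (fun sp => sp.1) false).map (fun sp => sp.1)) t.1 ∧
            t.2 ≤ (pvPrefixMax (PySem.List.sorted spans (fun sp => sp.1) false) none).getD
              (PySem.List.bisectRight ((PySem.List.sorted spans (fun sp => sp.1) false).map (fun sp => sp.1)) t.1 - 1) 0
          then (1 : Int) else 0]) []]) [] := by
  rw [PySem.List.foldl_append_singleton_eq_map, PySem.List.foldl_append_singleton_eq_map]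
  simp only [List.nil_append]
  have hA : ∀ label, (PySem.List.enumerate toks).foldl (fun m je =>
        if PySem.List.len ((PySem.Dict.ofList (κ := String) raw).getD label []) > 0 then
          (PySem.List.pyRange 0 (PySem.List.len ((PySem.Dict.ofList raw).getD label []))).foldl (fun m k =>
            let sp := PySem.List.pyGetD ((PySem.Dict.ofList raw).getD label []) k (0, 0)
            if je.2.1 ≥ sp.1 ∧ je.2.2 ≤ sp.2 then PySem.List.pySetD m je.1 1 else m) m
        else m) (List.replicate toks.length (0 : Int))
      = pvMaskOf toks ((PySem.Dict.ofList raw).getD label []) := fun label =>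
    pv_A_mask toks ((PySem.Dict.ofList raw).getD label [])
  simp only [hA]
  rw [show (PySem.Dict.ofList (κ := String) raw).keys = ((PySem.Dict.ofList (κ := String) raw).items).map (fun p => p.1) from rfl]
  rw [show (PySem.Dict.ofList (κ := String) raw).values = ((PySem.Dict.ofList (κ := String) raw).items).map (fun p => p.2) from rfl]
  rw [List.map_map, List.map_map]
  apply List.map_congr_left
  intro p hp
  have hget : (PySem.Dict.ofList (κ := String) raw).get? p.1 = some p.2 :=
    PySem.Dict.get?_of_mem_items _ (by simpa using hp) (PySem.Dict.nodup_keys_ofList raw)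
  simp only [Function.comp_apply]
  rw [PySem.Dict.getD_of_get?_eq_some _ [] hget]
  exact (pv_B_mask toks p.2).symm

-- ===== VERDICT (by name: the statement is the Claim_ definition above) =====
theorem generate_rationales_attention_spec : Claim_equal_generate_rationales_attention := by
  intro offs rats _ hpre
  unfold Spec_generate_rationales_attention
  unfold generate_rationales_attention generate_rationales_attention_alt
  unfold Pre_generate_rationales_attention at hpre
  rw [PySem.List.foldl_append_singleton_eq_map, PySem.List.foldl_append_singleton_eq_map]
  simp only [List.nil_append]
  apply List.map_congr_left
  intro i _
  exact pv_item_eq (PySem.List.pyGetD offs i []) (PySem.List.pyGetD rats i [])
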